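-- pv_equiv track=rewrite | github.com/manuel-j-glynias/writeVariants | clinvar_variant.py | getSignificanceTuple
-- ===== SOURCE A (Python) =====
-- def getSignificanceTuple(sigDict):
--     maxVal = 0
--     maxName = ''
--     explain = ''
--     for significance in sigDict:
--         if (len(explain) > 0):
--             explain += "/"
--         explain += significance + "(" + str(sigDict[significance]) + ")"
--         if (sigDict[significance] > maxVal):
--             maxVal = sigDict[significance]
--             maxName = significance
--     return maxName, explain
-- ===== SOURCE B (Python) =====
-- def getSignificanceTuple(sigDict):
--     items = list(sigDict.items())
--     explain = "/".join(k + "(" + str(v) + ")" for k, v in items)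
--     ranked = sorted(items, key=lambda kv: kv[1], reverse=True)
--     maxName = ranked[0][0] if ranked and ranked[0][1] > 0 else ''
--     return maxName, explain
-- ===== Notes on version B (the rewrite author's own statement) =====
-- stated objective: alternative
-- what changed: A's fused loop carrying three accumulators (running max value, its name, growing explanation with repeated lookups) is replaced by a sort-based selection: stable-sort the items descending by value and take the head (guarded by '> 0') as the winner, with the explanation built separately by '/'.join over the items without any dict lookup.
import Mathlib
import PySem

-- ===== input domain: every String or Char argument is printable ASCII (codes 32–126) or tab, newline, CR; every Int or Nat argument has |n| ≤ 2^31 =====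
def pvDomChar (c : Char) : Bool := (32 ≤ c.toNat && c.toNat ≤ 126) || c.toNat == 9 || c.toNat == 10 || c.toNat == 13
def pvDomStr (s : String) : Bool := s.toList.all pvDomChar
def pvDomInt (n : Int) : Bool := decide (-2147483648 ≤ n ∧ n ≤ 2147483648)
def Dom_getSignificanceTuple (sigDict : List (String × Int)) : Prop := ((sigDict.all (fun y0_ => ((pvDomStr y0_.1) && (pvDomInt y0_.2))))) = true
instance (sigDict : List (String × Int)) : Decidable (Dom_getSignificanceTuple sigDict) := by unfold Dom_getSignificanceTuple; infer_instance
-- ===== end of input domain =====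

-- B replaces A's fused three-accumulator loop by a stable sort descending by value whose head
-- (guarded by '> 0') is the winner, plus a separate '/'-join over the items for the explanation
-- (alternative algorithm, O(n log n)); equal on association lists with distinct keys.


-- Python's sigDict[k] on the dict encoded as an association list (first match)
def pyLook (d : List (String × Int)) (k : String) : Int :=
  PySem.Dict.getD (PySem.Dict.mk d) k 0

-- ===== PORT A =====
def getSignificanceTuple (sigDict : List (String × Int)) : String × String :=
  let st := sigDict.foldl (fun (st : (Int × String) × List Char) significance =>
      let v := pyLook sigDict significance.1
      let ex := if 0 < st.2.length then st.2 ++ ['/'] else st.2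
      let ex := ex ++ significance.1.toList ++ '(' :: (PySem.Int.toStr v).toList ++ [')']
      let mx := if v > st.1.1 then (v, significance.1) else st.1
      (mx, ex)) ((0, ""), [])
  (st.1.2, String.ofList st.2)

-- ===== PORT B =====
def getSignificanceTuple_alt (sigDict : List (String × Int)) : String × String :=
  let explain := PySem.Chars.join ['/']
      (sigDict.map (fun p => p.1.toList ++ '(' :: (PySem.Int.toStr p.2).toList ++ [')']))
  let ranked := PySem.List.sorted sigDict (fun kv => kv.2) true
  let maxName :=
    match ranked with
    | [] => ""
    | kv :: _ => if kv.2 > 0 then kv.1 else ""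
  (maxName, String.ofList explain)

-- ===== PRECONDITION & SPEC =====
-- Pre_ excludes association lists with duplicate keys: those cannot arise from a Python dict
-- (dict construction deduplicates), so the list encoding is ambiguous there.
def Pre_getSignificanceTuple (sigDict : List (String × Int)) : Prop :=
  (sigDict.map Prod.fst).Nodup
instance (sigDict : List (String × Int)) : Decidable (Pre_getSignificanceTuple sigDict) := by
  unfold Pre_getSignificanceTuple; infer_instance

def pvWitness_getSignificanceTuple : (List (String × Int)) := [("benign", 2), ("pathogenic", 3)]

def Spec_getSignificanceTuple (sigDict : List (String × Int)) (out : String × String) : Prop := out = getSignificanceTuple_alt sigDict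
instance (sigDict : List (String × Int)) (out : String × String) : Decidable (Spec_getSignificanceTuple sigDict out) := by unfold Spec_getSignificanceTuple; infer_instance

-- ===== CLAIM (what is proved, stated in full; the proofs are below) =====
def Claim_equal_getSignificanceTuple : Prop := ∀ (sigDict : List (String × Int)), Dom_getSignificanceTuple sigDict → Pre_getSignificanceTuple sigDict → Spec_getSignificanceTuple sigDict (getSignificanceTuple sigDict)

-- ===== LEMMAS AND PROOFS =====

-- with distinct keys, looking up a member pair's key yields that pair's value
theorem pyLook_of_mem (l : List (String × Int)) (h : (l.map Prod.fst).Nodup)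
    (p : String × Int) (hp : p ∈ l) : pyLook l p.1 = p.2 := by
  induction l with
  | nil => cases hp
  | cons q rest ih =>
      simp only [List.map_cons, List.nodup_cons] at h
      rcases List.mem_cons.1 hp with rfl | hp'
      · simp [pyLook, PySem.Dict.getD, PySem.Dict.get?]
      · have hne : (q.1 == p.1) = false := by
          refine beq_eq_false_iff_ne.2 ?_
          intro he
          exact h.1 (he ▸ List.mem_map_of_mem hp')
        have := ih h.2 hp'
        simpa [pyLook, PySem.Dict.getD, PySem.Dict.get?, List.find?, hne] using this

-- A's running-max step as a pure function on pairs
def gstep (m x : String × Int) : String × Int := if m.2 < x.2 then x else m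

-- the head of the stable descending insertion sort runs A's strict running-max recurrence
theorem foldl_insertBy_head :
    ∀ (t : List (String × Int)) (h : String × Int) (rest : List (String × Int)),
    ∃ rest', t.foldl (fun acc x => PySem.List.insertBy (fun a b => decide (b.2 < a.2)) x acc) (h :: rest)
        = (t.foldl gstep h) :: rest' := by
  intro t
  induction t with
  | nil => intro h rest; exact ⟨rest, rfl⟩
  | cons x t ih =>
      intro h rest
      simp only [List.foldl_cons]
      by_cases hc : h.2 < x.2
      · have : PySem.List.insertBy (fun a b => decide (b.2 < a.2)) x (h :: rest) = x :: h :: rest := by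
          simp [PySem.List.insertBy, hc]
        rw [this]
        have hg : gstep h x = x := by unfold gstep; simp [hc]
        simpa [hg] using ih x (h :: rest)
      · have : PySem.List.insertBy (fun a b => decide (b.2 < a.2)) x (h :: rest)
            = h :: PySem.List.insertBy (fun a b => decide (b.2 < a.2)) x rest := by
          simp [PySem.List.insertBy, hc]
        rw [this]
        have hg : gstep h x = h := by unfold gstep; simp [hc]
        simpa [hg] using ih h _

-- sorted descending by value of a nonempty list: head = A's running max over it
theorem sorted_head (p : String × Int) (t : List (String × Int)) :
    ∃ rest', PySem.List.sorted (p :: t) (fun kv => kv.2) true = (t.foldl gstep p) :: rest' := by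
  rw [PySem.List.sorted_rev_eq_foldl_insertBy]
  simp only [List.foldl_cons]
  have h1 : PySem.List.insertBy (fun a b => decide ((fun kv : String × Int => kv.2) b < (fun kv : String × Int => kv.2) a)) p ([] : List (String × Int)) = [p] := by
    simp [PySem.List.insertBy]
  rw [h1]
  exact foldl_insertBy_head t p []

-- A's thresholded running max in terms of the plain pair-max fold
theorem maxA_fold :
    ∀ (t : List (String × Int)) (a : String × Int) (mv : Int) (mn : String),
    t.foldl (fun (s : Int × String) (x : String × Int) => if x.2 > s.1 then (x.2, x.1) else s)
        (if a.2 > mv then (a.2, a.1) else (mv, mn))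
      = (if (t.foldl gstep a).2 > mv then ((t.foldl gstep a).2, (t.foldl gstep a).1) else (mv, mn)) := by
  intro t
  induction t with
  | nil => intro a mv mn; rfl
  | cons x t ih =>
      intro a mv mn
      simp only [List.foldl_cons]
      have hstep : (if x.2 > (if a.2 > mv then (a.2, a.1) else (mv, mn)).1 then (x.2, x.1)
            else if a.2 > mv then (a.2, a.1) else (mv, mn))
          = (if (gstep a x).2 > mv then ((gstep a x).2, (gstep a x).1) else (mv, mn)) := by
        unfold gstep
        split_ifs <;> simp_all <;> omega
      rw [hstep, ih]

-- the explanation accumulator is a '/'-join (items are nonempty: each contains '(')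
theorem join_cons (ff : List (List Char)) (aa : List Char) :
    PySem.Chars.join ['/'] (aa :: ff) = aa ++ ff.flatMap (fun i => '/' :: i) := by
  induction ff generalizing aa with
  | nil => simp [PySem.Chars.join, List.intercalate]
  | cons b ff ih =>
      have := ih b
      simp only [PySem.Chars.join, List.intercalate, List.intersperse] at *
      simp_all

theorem explain_fold (item : (String × Int) → List Char) (_hne : ∀ p, item p ≠ []) :
    ∀ (t : List (String × Int)) (acc : List Char), acc ≠ [] →
    t.foldl (fun ex p => (if 0 < ex.length then ex ++ ['/'] else ex) ++ item p) acc
      = acc ++ t.flatMap (fun p => '/' :: item p) := by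
  intro t
  induction t with
  | nil => intro acc _; simp
  | cons p t ih =>
      intro acc hacc
      have hlen : 0 < acc.length := List.length_pos_iff.2 hacc
      simp only [List.foldl_cons, if_pos hlen]
      rw [ih (acc ++ ['/'] ++ item p) (by simp)]
      simp

-- A's fused fold splits into the max fold and the explain fold
theorem fused_split (look : String → Int) :
    ∀ (t : List (String × Int)) (m0 : Int × String) (e0 : List Char),
    t.foldl (fun (st : (Int × String) × List Char) significance =>
        let v := look significance.1
        let ex := if 0 < st.2.length then st.2 ++ ['/'] else st.2
        let ex := ex ++ significance.1.toList ++ '(' :: (PySem.Int.toStr v).toList ++ [')']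
        let mx := if v > st.1.1 then (v, significance.1) else st.1
        (mx, ex)) (m0, e0)
      = (t.foldl (fun (s : Int × String) (x : String × Int) =>
            if look x.1 > s.1 then (look x.1, x.1) else s) m0,
         t.foldl (fun ex p =>
            (if 0 < ex.length then ex ++ ['/'] else ex)
              ++ p.1.toList ++ '(' :: (PySem.Int.toStr (look p.1)).toList ++ [')']) e0) := by
  intro t
  induction t with
  | nil => intro m0 e0; rfl
  | cons x t ih => intro m0 e0; simp only [List.foldl_cons]; exact ih _ _

-- replace the looked-up value by the pair's own value, elementwise
theorem foldl_look_eq (l : List (String × Int)) (h : (l.map Prod.fst).Nodup) :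
    ∀ (t : List (String × Int)), (∀ x ∈ t, x ∈ l) → ∀ (m0 : Int × String),
    t.foldl (fun (s : Int × String) (x : String × Int) =>
        if pyLook l x.1 > s.1 then (pyLook l x.1, x.1) else s) m0
      = t.foldl (fun (s : Int × String) (x : String × Int) => if x.2 > s.1 then (x.2, x.1) else s) m0 := by
  intro t
  induction t with
  | nil => intro _ m0; rfl
  | cons x t ih =>
      intro hsub m0
      have hv : pyLook l x.1 = x.2 := pyLook_of_mem l h x (hsub x List.mem_cons_self)
      simp only [List.foldl_cons, hv]
      exact ih (fun y hy => hsub y (List.mem_cons_of_mem _ hy)) _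

-- ===== VERDICT (by name: the statement is the Claim_ definition above) =====
theorem getSignificanceTuple_spec : Claim_equal_getSignificanceTuple := by
  intro sigDict _ hpre
  unfold Spec_getSignificanceTuple getSignificanceTuple getSignificanceTuple_alt
  have hnd : (sigDict.map Prod.fst).Nodup := hpre
  cases sigDict with
  | nil => rfl
  | cons p t =>
      have hsub : ∀ x ∈ p :: t, x ∈ p :: t := fun x hx => hx
      -- split the fused fold
      rw [fused_split (pyLook (p :: t)) (p :: t) ((0, "")) []]
      -- max side: A's fold = threshold of the running pair-max
      have hmax : ((p :: t).foldl (fun (s : Int × String) (x : String × Int) =>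
            if pyLook (p :: t) x.1 > s.1 then (pyLook (p :: t) x.1, x.1) else s) (0, ""))
          = (if (t.foldl gstep p).2 > 0 then ((t.foldl gstep p).2, (t.foldl gstep p).1) else (0, "")) := by
        rw [foldl_look_eq (p :: t) hnd (p :: t) hsub (0, "")]
        show (t.foldl _ (if p.2 > 0 then (p.2, p.1) else ((0 : Int), ""))) = _
        exact maxA_fold t p 0 ""
      -- B side: head of the stable descending sort is that running pair-max
      obtain ⟨rest', hsort⟩ := sorted_head p t
      -- explain side: A's accumulator is the '/'-join of the items
      have hitem : ∀ q : String × Int,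
          (q.1.toList ++ ('(' :: ((PySem.Int.toStr (pyLook (p :: t) q.1)).toList ++ [')']))) ≠ [] := by
        intro q hq
        have := congrArg List.length hq
        simp at this
      have hexp : (p :: t).foldl (fun ex q =>
            (if 0 < ex.length then ex ++ ['/'] else ex)
              ++ q.1.toList ++ '(' :: (PySem.Int.toStr (pyLook (p :: t) q.1)).toList ++ [')']) []
          = PySem.Chars.join ['/']
              ((p :: t).map (fun q => q.1.toList ++ '(' :: (PySem.Int.toStr (pyLook (p :: t) q.1)).toList ++ [')'])) := by
        simp only [List.foldl_cons, List.map_cons, List.length_nil, Nat.lt_irrefl,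
          if_false, List.nil_append, List.append_assoc, List.cons_append]
        refine (explain_fold (fun q => q.1.toList ++ ('(' :: ((PySem.Int.toStr (pyLook (p :: t) q.1)).toList ++ [')'])))
              hitem t _ (hitem p)).trans ?_
        rw [join_cons]
        simp [List.flatMap_map]
      -- items with lookup = items with their own value, under distinct keys
      have hmapeq : ((p :: t).map (fun q => q.1.toList ++ '(' :: (PySem.Int.toStr (pyLook (p :: t) q.1)).toList ++ [')']))
          = ((p :: t).map (fun q => q.1.toList ++ '(' :: (PySem.Int.toStr q.2).toList ++ [')'])) := by
        refine List.map_congr_left ?_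
        intro q hq
        rw [pyLook_of_mem (p :: t) hnd q hq]
      simp only [hmax, hsort, hexp, hmapeq]
      split <;> simp_all
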